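-- pv_equiv track=rewrite | github.com/prince71753/361-Final-Project | pareto.py | compare_pareto_frontiers
-- ===== SOURCE A (Python) =====
-- def compare_pareto_frontiers(pareto1, pareto2, p3, p4, p5):
--     pareto1_names = set(name for name, _ in pareto1)
--     pareto2_names = set(name for name, _ in pareto2)
--     p3_names = set(name for name, _ in p3)
--     p4_names= set(name for name, _ in p4)
--     p5_names= set(name for name, _ in p5)
--
--     common_characters = pareto1_names.intersection(pareto2_names).intersection(p3_names).intersection(p4_names).intersection(p5_names)
--     unique_to_pareto1 = pareto1_names - common_characters
--     unique_to_pareto2 = pareto2_names - common_characters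
--     uniquetop3 = p3_names- common_characters
--     uniquetop4 = p4_names- common_characters
--     uniquetop5 = p5_names- common_characters
--
--     return common_characters, unique_to_pareto1, unique_to_pareto2, uniquetop3, uniquetop4, uniquetop5
-- ===== SOURCE B (Python) =====
-- def compare_pareto_frontiers(pareto1, pareto2, p3, p4, p5):
--     name_sets = [set(name for name, _ in f) for f in (pareto1, pareto2, p3, p4, p5)]
--     counts = {}
--     for s in name_sets:
--         for name in s:
--             counts[name] = counts.get(name, 0) + 1
--     common = set(name for name, c in counts.items() if c == 5)
--     s1, s2, s3, s4, s5 = name_sets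
--     return common, s1 - common, s2 - common, s3 - common, s4 - common, s5 - common
-- ===== Notes on version B (the rewrite author's own statement) =====
-- stated objective: alternative
-- what changed: Replaces the chain of four pairwise set intersections with a single occurrence-counting pass: a dict tallies in how many of the five deduplicated frontiers each name appears, and common is the names counted five times.
import Mathlib
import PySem

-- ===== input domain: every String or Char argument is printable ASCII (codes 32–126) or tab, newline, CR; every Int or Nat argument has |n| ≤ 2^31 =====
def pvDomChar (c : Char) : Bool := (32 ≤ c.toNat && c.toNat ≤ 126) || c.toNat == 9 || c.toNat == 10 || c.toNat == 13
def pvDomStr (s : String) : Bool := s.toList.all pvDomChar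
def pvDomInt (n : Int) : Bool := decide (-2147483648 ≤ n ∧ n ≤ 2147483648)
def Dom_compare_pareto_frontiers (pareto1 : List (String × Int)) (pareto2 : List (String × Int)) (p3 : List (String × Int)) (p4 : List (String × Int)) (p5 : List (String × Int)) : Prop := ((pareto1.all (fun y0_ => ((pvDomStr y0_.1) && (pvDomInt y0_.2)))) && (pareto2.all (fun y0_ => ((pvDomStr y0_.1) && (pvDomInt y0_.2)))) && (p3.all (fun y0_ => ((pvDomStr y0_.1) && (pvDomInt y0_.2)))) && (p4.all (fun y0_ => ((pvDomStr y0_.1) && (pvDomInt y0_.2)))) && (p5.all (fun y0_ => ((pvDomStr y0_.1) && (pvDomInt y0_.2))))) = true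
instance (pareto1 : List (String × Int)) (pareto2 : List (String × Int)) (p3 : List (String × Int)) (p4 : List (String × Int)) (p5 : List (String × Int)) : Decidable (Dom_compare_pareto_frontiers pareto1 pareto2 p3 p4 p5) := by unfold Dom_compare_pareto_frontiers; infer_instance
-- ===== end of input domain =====

-- ===== PORT A =====
-- B replaces the intersection chain with one counting pass over the five deduplicated frontiers (objective: alternative).
def compare_pareto_frontiers (pareto1 : List (String × Int)) (pareto2 : List (String × Int)) (p3 : List (String × Int)) (p4 : List (String × Int)) (p5 : List (String × Int)) : List String × List String × List String × List String × List String × List String :=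
  let pareto1_names : PySem.Set String := PySem.Set.ofList (pareto1.map (fun x => x.1))
  let pareto2_names : PySem.Set String := PySem.Set.ofList (pareto2.map (fun x => x.1))
  let p3_names : PySem.Set String := PySem.Set.ofList (p3.map (fun x => x.1))
  let p4_names : PySem.Set String := PySem.Set.ofList (p4.map (fun x => x.1))
  let p5_names : PySem.Set String := PySem.Set.ofList (p5.map (fun x => x.1))
  let common_characters := PySem.Set.inter (PySem.Set.inter (PySem.Set.inter (PySem.Set.inter pareto1_names pareto2_names) p3_names) p4_names) p5_names
  let unique_to_pareto1 := PySem.Set.diff pareto1_names common_characters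
  let unique_to_pareto2 := PySem.Set.diff pareto2_names common_characters
  let uniquetop3 := PySem.Set.diff p3_names common_characters
  let uniquetop4 := PySem.Set.diff p4_names common_characters
  let uniquetop5 := PySem.Set.diff p5_names common_characters
  (common_characters, unique_to_pareto1, unique_to_pareto2, uniquetop3, uniquetop4, uniquetop5)

-- ===== PORT B =====
def compare_pareto_frontiers_alt (pareto1 : List (String × Int)) (pareto2 : List (String × Int)) (p3 : List (String × Int)) (p4 : List (String × Int)) (p5 : List (String × Int)) : List String × List String × List String × List String × List String × List String :=
  let s1 : PySem.Set String := PySem.Set.ofList (pareto1.map (fun x => x.1))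
  let s2 : PySem.Set String := PySem.Set.ofList (pareto2.map (fun x => x.1))
  let s3 : PySem.Set String := PySem.Set.ofList (p3.map (fun x => x.1))
  let s4 : PySem.Set String := PySem.Set.ofList (p4.map (fun x => x.1))
  let s5 : PySem.Set String := PySem.Set.ofList (p5.map (fun x => x.1))
  let nameSets : List (PySem.Set String) := [s1, s2, s3, s4, s5]
  let counts : PySem.Dict String Int :=
    nameSets.foldl (fun d s => s.foldl (fun d name => d.modify name 0 (· + 1)) d) PySem.Dict.empty
  let common : PySem.Set String :=
    PySem.Set.ofList ((counts.items.filter (fun kv => kv.2 == 5)).map (fun kv => kv.1))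
  (common, PySem.Set.diff s1 common, PySem.Set.diff s2 common, PySem.Set.diff s3 common,
   PySem.Set.diff s4 common, PySem.Set.diff s5 common)

-- ===== PRECONDITION & SPEC =====
def Spec_compare_pareto_frontiers (pareto1 : List (String × Int)) (pareto2 : List (String × Int)) (p3 : List (String × Int)) (p4 : List (String × Int)) (p5 : List (String × Int)) (out : List String × List String × List String × List String × List String × List String) : Prop := out = compare_pareto_frontiers_alt pareto1 pareto2 p3 p4 p5
instance (pareto1 : List (String × Int)) (pareto2 : List (String × Int)) (p3 : List (String × Int)) (p4 : List (String × Int)) (p5 : List (String × Int)) (out : List String × List String × List String × List String × List String × List String) : Decidable (Spec_compare_pareto_frontiers pareto1 pareto2 p3 p4 p5 out) := by unfold Spec_compare_pareto_frontiers; infer_instance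

-- ===== CLAIM (what is proved, stated in full; the proofs are below) =====
def Claim_equal_compare_pareto_frontiers : Prop := ∀ (pareto1 : List (String × Int)) (pareto2 : List (String × Int)) (p3 : List (String × Int)) (p4 : List (String × Int)) (p5 : List (String × Int)), Dom_compare_pareto_frontiers pareto1 pareto2 p3 p4 p5 → Spec_compare_pareto_frontiers pareto1 pareto2 p3 p4 p5 (compare_pareto_frontiers pareto1 pareto2 p3 p4 p5)

-- ===== LEMMAS AND PROOFS =====
-- In a duplicate-free list, count is 1 on members and 0 elsewhere.
theorem count_nodup_ite {a : List String} (ha : a.Nodup) (x : String) :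
    a.count x = if x ∈ a then 1 else 0 := by
  split_ifs with h
  · exact List.count_eq_one_of_mem ha h
  · exact List.count_eq_zero_of_not_mem h

-- Core: the five-way intersection equals the names tallied five times by the counter.
theorem commonEq (a b c d e : List String) (ha : a.Nodup) (hb : b.Nodup)
    (hc : c.Nodup) (hd : d.Nodup) (he : e.Nodup) :
    PySem.Set.inter (PySem.Set.inter (PySem.Set.inter (PySem.Set.inter a b) c) d) e =
      PySem.Set.ofList
        (((PySem.Dict.counter (a ++ b ++ c ++ d ++ e)).items.filter
            (fun kv => kv.2 == 5)).map (fun kv => kv.1)) := by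
  rw [PySem.Dict.items_counter, List.filter_map, List.map_map]
  -- name things
  set L := a ++ b ++ c ++ d ++ e with hLdef
  have hmapid : (List.map ((fun kv : String × Int => kv.1) ∘ fun k => (k, (↑(L.count k) : Int)))
      (List.filter ((fun kv : String × Int => kv.2 == 5) ∘ fun k => (k, (↑(L.count k) : Int)))
        (PySem.Set.ofList L)))
      = List.filter (fun k => (↑(L.count k) : Int) == 5) (PySem.Set.ofList L) := by
    simp [Function.comp_def]
  rw [hmapid]
  have hnodup : (List.filter (fun k => (↑(L.count k) : Int) == 5) (PySem.Set.ofList L)).Nodup :=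
    (PySem.Set.nodup_ofList L).filter _
  rw [PySem.Set.ofList_eq_self_of_nodup _ hnodup]
  -- decompose ofList L
  have hsplit : PySem.Set.ofList L
      = a ++ (PySem.Set.ofList (b ++ c ++ d ++ e)).filter (fun y => !(PySem.Set.contains a y)) := by
    have : L = a ++ (b ++ c ++ d ++ e) := by simp [hLdef]
    rw [this, PySem.Set.ofList_append, PySem.Set.ofList_eq_self_of_nodup a ha,
      PySem.Set.update_eq_append_filter]
  rw [hsplit, List.filter_append]
  have hcount : ∀ y, L.count y = a.count y + b.count y + c.count y + d.count y + e.count y := by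
    intro y; simp [hLdef, List.count_append]; omega
  have htail : List.filter (fun k => (↑(L.count k) : Int) == 5)
      ((PySem.Set.ofList (b ++ c ++ d ++ e)).filter (fun y => !(PySem.Set.contains a y))) = [] := by
    apply List.filter_eq_nil_iff.mpr
    intro y hy
    have hmem := List.mem_filter.mp hy
    have hna : y ∉ a := by
      intro h
      have := hmem.2
      simp at this
      exact this h
    have h1 : a.count y = 0 := List.count_eq_zero_of_not_mem hna
    have h2 : b.count y ≤ 1 := by rw [count_nodup_ite hb]; split_ifs <;> omega
    have h3 : c.count y ≤ 1 := by rw [count_nodup_ite hc]; split_ifs <;> omega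
    have h4 : d.count y ≤ 1 := by rw [count_nodup_ite hd]; split_ifs <;> omega
    have h5 : e.count y ≤ 1 := by rw [count_nodup_ite he]; split_ifs <;> omega
    have h6 := hcount y
    simp only [beq_iff_eq]
    intro hcontra
    omega
  rw [htail, List.append_nil]
  simp only [PySem.Set.inter, List.filter_filter]
  apply List.filter_congr
  intro x hx
  have h1 : a.count x = 1 := List.count_eq_one_of_mem ha hx
  have h6 := hcount x
  by_cases h2 : x ∈ b <;> by_cases h3 : x ∈ c <;> by_cases h4 : x ∈ d <;> by_cases h5 : x ∈ e <;>
    simp [PySem.Set.contains_iff, h2, h3, h4, h5, h6, count_nodup_ite hb, count_nodup_ite hc,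
      count_nodup_ite hd, count_nodup_ite he, h1, beq_iff_eq]

-- ===== VERDICT (by name: the statement is the Claim_ definition above) =====
theorem compare_pareto_frontiers_spec : Claim_equal_compare_pareto_frontiers := by
  intro p1 p2 p3 p4 p5 _
  unfold Spec_compare_pareto_frontiers compare_pareto_frontiers compare_pareto_frontiers_alt
  have h := commonEq (PySem.Set.ofList (p1.map (fun x => x.1))) (PySem.Set.ofList (p2.map (fun x => x.1)))
    (PySem.Set.ofList (p3.map (fun x => x.1))) (PySem.Set.ofList (p4.map (fun x => x.1)))
    (PySem.Set.ofList (p5.map (fun x => x.1)))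
    (PySem.Set.nodup_ofList _) (PySem.Set.nodup_ofList _) (PySem.Set.nodup_ofList _)
    (PySem.Set.nodup_ofList _) (PySem.Set.nodup_ofList _)
  rw [PySem.Dict.counter_eq_foldl, List.foldl_append, List.foldl_append, List.foldl_append, List.foldl_append] at h
  simp only [List.foldl]
  rw [h]
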